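-- pv_equiv track=rewrite | github.com/pypi-data/pypi-mirror-325 | packages/poetry-analysis/poetry_analysis-0.2.0.tar.gz/poetry_analysis-0.2.0/src/poetry_analysis/alliteration.py | count_alliteration
-- ===== SOURCE A (Python) =====
-- def count_alliteration(text: str) -> dict:
--     """Count the number of times the same word-initial letter occurs in a text.
--
--     Example use:
--     >>> text = "Sirius som seer"
--     >>> count_alliteration(text)
--     {'s': 3}
--     """
--     words = text.split()
--     initial_counts = {}
--
--     for word in words:
--         initial_letter = word[0].lower()
--         if initial_letter in initial_counts:
--             initial_counts[initial_letter] += 1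
--         else:
--             initial_counts[initial_letter] = 1
--
--     alliteration_count = {
--         letter: count for letter, count in initial_counts.items() if count > 1
--     }
--
--     return alliteration_count
-- ===== SOURCE B (Python) =====
-- def count_alliteration(text: str) -> dict:
--     """Count word-initial letters occurring more than once.
--
--     Different algorithm: no counting dict.  Repeatedly take the first
--     remaining initial, partition the list into that letter / the rest in one
--     filter pass, and derive the letter's count from the length drop; recurse
--     on the shrunken list.  Letters come out in first-occurrence order.
--     """
--     initials = [word[0].lower() for word in text.split()]
--     result = {}
--     while initials:
--         letter = initials[0]
--         remaining = [c for c in initials if c != letter]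
--         count = len(initials) - len(remaining)
--         if count > 1:
--             result[letter] = count
--         initials = remaining
--     return result
-- ===== Notes on version B (the rewrite author's own statement) =====
-- stated objective: alternative
-- what changed: Replaces the single-pass dict tally plus filtering comprehension by a dict-free repeated-partition loop: take the head initial, filter it out of the list in one pass, read its count off the length drop, and continue on the shrunken list.
import Mathlib
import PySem

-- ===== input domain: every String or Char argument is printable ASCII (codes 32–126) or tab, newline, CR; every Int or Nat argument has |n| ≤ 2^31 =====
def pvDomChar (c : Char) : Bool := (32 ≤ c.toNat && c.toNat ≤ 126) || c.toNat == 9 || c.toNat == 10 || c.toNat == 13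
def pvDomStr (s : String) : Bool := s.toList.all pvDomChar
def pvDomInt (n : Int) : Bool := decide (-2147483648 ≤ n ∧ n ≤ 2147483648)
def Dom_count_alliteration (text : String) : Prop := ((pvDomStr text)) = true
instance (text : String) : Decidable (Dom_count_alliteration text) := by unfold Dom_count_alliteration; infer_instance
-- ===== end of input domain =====

-- B replaces A's dict-tallying pass by a dict-free repeated-partition loop: take the head initial,
-- filter it out of the list in one pass, read its count off the length drop, recurse on the rest
-- (objective: alternative; not faster).

-- shared subexpression of both Pythons: word[0].lower() — word[0] is a one-character string,
-- modeled as the Char PySem.Str.pyGet? returns and lowered with PySem.Chars.lowerChar;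
-- split() never yields "", so the index never raises and the .getD ' ' default is unreachable.
def keyFn (w : String) : String :=
  String.singleton (PySem.Chars.lowerChar ((PySem.Str.pyGet? w 0).getD ' '))

-- ===== PORT A =====
def count_alliteration (text : String) : List (String × Int) :=
  let words := PySem.Str.split₀ text
  let initial_counts : PySem.Dict String Int :=
    words.foldl (fun d w =>
      let initial_letter := keyFn w
      if d.contains initial_letter then
        d.insert initial_letter (d.getD initial_letter 0 + 1)
      else
        d.insert initial_letter 1) PySem.Dict.empty
  (initial_counts.items.foldl
    (fun d p => if 1 < p.2 then d.insert p.1 p.2 else d) PySem.Dict.empty).items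

-- ===== PORT B =====
-- the while-loop of Source B: state = (remaining initials, result dict)
def pvAllitLoop (l : List String) (d : PySem.Dict String Int) : PySem.Dict String Int :=
  match l with
  | [] => d
  | letter :: rest =>
    let remaining := (letter :: rest).filter (fun c => c != letter)
    let count : Int := ((letter :: rest).length : Int) - (remaining.length : Int)
    if 1 < count then pvAllitLoop remaining (d.insert letter count)
    else pvAllitLoop remaining d
termination_by l.length
decreasing_by
  all_goals
    rw [List.filter_cons_of_neg (by simp)]
    exact Nat.lt_succ_of_le (List.length_filter_le _ _)

def count_alliteration_alt (text : String) : List (String × Int) :=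
  let initials := (PySem.Str.split₀ text).map keyFn
  (pvAllitLoop initials PySem.Dict.empty).items

-- ===== PRECONDITION & SPEC =====
def Spec_count_alliteration (text : String) (out : List (String × Int)) : Prop := out = count_alliteration_alt text
instance (text : String) (out : List (String × Int)) : Decidable (Spec_count_alliteration text out) := by unfold Spec_count_alliteration; infer_instance

-- ===== CLAIM (what is proved, stated in full; the proofs are below) =====
def Claim_equal_count_alliteration : Prop := ∀ (text : String), Dom_count_alliteration text → Spec_count_alliteration text (count_alliteration text)

-- ===== LEMMAS AND PROOFS =====

-- removing every copy of x from xs drops exactly (count of x) elements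
theorem count_add_length_filter (x : String) (xs : List String) :
    xs.count x + (xs.filter (fun c => c != x)).length = xs.length := by
  induction xs with
  | nil => rfl
  | cons y ys ih => by_cases h : y = x <;> simp [h] <;> omega

-- removing every copy of x leaves the other letters' counts unchanged
theorem count_int_filter_ne (x c : String) (xs : List String) (h : c ≠ x) :
    ((xs.filter (fun y => y != x)).count c : Int) = ((x :: xs).count c : Int) := by
  rw [List.count_filter (by simp [h])]
  have h2 : ¬ x = c := fun hh => h hh.symm
  simp [h2]

-- first-occurrence dedup commutes with filter
theorem ofList_filter {α : Type} [BEq α] [LawfulBEq α] (p : α → Bool) (xs : List α) :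
    PySem.Set.ofList (xs.filter p) = (PySem.Set.ofList xs).filter p := by
  induction xs with
  | nil => rfl
  | cons y ys ih =>
    by_cases h : p y = true
    · rw [List.filter_cons_of_pos h, PySem.Set.ofList_cons, PySem.Set.ofList_cons,
        List.filter_cons_of_pos h, ih]
      show _ = _ :: List.filter p (List.filter (fun a => !(a == y)) _)
      show _ :: List.filter (fun a => !(a == y)) _ = _
      rw [List.filter_filter, List.filter_filter]
      have hcomm : (fun a => !(a == y) && p a) = (fun a => p a && !(a == y)) := by
        funext a; exact Bool.and_comm _ _
      rw [hcomm]
    · rw [List.filter_cons_of_neg h, PySem.Set.ofList_cons, List.filter_cons_of_neg h, ih]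
      show _ = List.filter p (List.filter (fun a => !(a == y)) _)
      rw [List.filter_filter]
      have hp : (fun a => p a && !(a == y)) = p := by
        funext a
        by_cases ha : a = y
        · subst ha; simp [h]
        · simp [ha]
      rw [hp]

-- A dict comprehension over fresh, pairwise-distinct keys: its items are the filtered pairs.
theorem foldl_insert_if_items {β : Type} (l : List β) (k : β → String) (v : β → Int)
    (p : β → Prop) [DecidablePred p] (d : PySem.Dict String Int)
    (hd : d.keys.Nodup) (hfresh : ∀ x ∈ l, d.contains (k x) = false)
    (hnd : (l.map k).Nodup) :
    (l.foldl (fun d x => if p x then d.insert (k x) (v x) else d) d).items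
      = d.items ++ (l.filter (fun x => decide (p x))).map (fun x => (k x, v x)) := by
  induction l generalizing d with
  | nil => simp
  | cons x xs ih =>
    simp only [List.map_cons, List.nodup_cons] at hnd
    by_cases hp : p x
    · have hfx : d.contains (k x) = false := hfresh x (List.mem_cons_self ..)
      have hstep := PySem.Dict.items_insert_of_not_contains (d := d) (k := k x) (v := v x) hfx
      simp only [List.foldl_cons, if_pos hp]
      rw [ih (d.insert (k x) (v x))
          (PySem.Dict.nodup_keys_insert _ _ _ hd)
          (by
            intro y hy
            rw [PySem.Dict.contains_insert]
            have h1 : (k y == k x) = false := by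
              simp only [beq_eq_false_iff_ne, ne_eq]
              intro h; exact hnd.1 (h ▸ List.mem_map_of_mem hy)
            rw [h1, hfresh y (List.mem_cons_of_mem _ hy)]
            rfl)
          hnd.2]
      rw [hstep]
      simp [hp]
    · simp only [List.foldl_cons, if_neg hp]
      rw [ih d hd (fun y hy => hfresh y (List.mem_cons_of_mem _ hy)) hnd.2]
      simp [hp]

-- B's partition loop emits exactly the dedup-ordered (letter, count) pairs with count > 1.
theorem pvAllitLoop_items (l : List String) (d : PySem.Dict String Int) :
    d.keys.Nodup → (∀ c ∈ l, d.contains c = false) →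
    (pvAllitLoop l d).items
      = d.items ++ ((PySem.Set.ofList l).filter
            (fun c => decide (1 < (l.count c : Int)))).map
          (fun c => (c, (l.count c : Int))) := by
  induction l, d using pvAllitLoop.induct with
  | case1 d => intro _ _; simp [pvAllitLoop]
  | case2 d x xs r cnt hlt ih =>
    intro hd hfresh
    have hr : r = xs.filter (fun c => c != x) := List.filter_cons_of_neg (by simp)
    have hcnt : cnt = ((x :: xs).count x : Int) := by
      show ((x :: xs).length : Int) - (r.length : Int) = _
      rw [hr, List.count_cons_self]
      have := count_add_length_filter x xs
      simp only [List.length_cons]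
      omega
    have hset : PySem.Set.ofList (x :: xs) = x :: PySem.Set.ofList r := by
      rw [PySem.Set.ofList_cons, hr, ofList_filter]
      rfl
    have hmem : ∀ c ∈ PySem.Set.ofList r, c ≠ x ∧ (r.count c : Int) = ((x :: xs).count c : Int) := by
      intro c hc
      rw [PySem.Set.mem_ofList, hr, List.mem_filter] at hc
      have hne : c ≠ x := by simpa using hc.2
      exact ⟨hne, by rw [hr]; exact count_int_filter_ne x c xs hne⟩
    have htail : ((PySem.Set.ofList r).filter
            (fun c => decide (1 < ((x :: xs).count c : Int)))).map
            (fun c => (c, ((x :: xs).count c : Int)))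
        = ((PySem.Set.ofList r).filter
            (fun c => decide (1 < (r.count c : Int)))).map
            (fun c => (c, (r.count c : Int))) := by
      rw [List.filter_congr (fun c hc => by rw [← (hmem c hc).2])]
      exact List.map_congr_left (fun c hc =>
        by rw [← (hmem c (List.mem_of_mem_filter hc)).2])
    have hfx : d.contains x = false := hfresh x (List.mem_cons_self ..)
    have hins : (d.insert x cnt).items = d.items ++ [(x, cnt)] :=
      PySem.Dict.items_insert_of_not_contains (d := d) (k := x) (v := cnt) hfx
    have hstep : pvAllitLoop (x :: xs) d = pvAllitLoop r (d.insert x cnt) := by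
      rw [pvAllitLoop]
      exact if_pos hlt
    rw [hstep, ih (PySem.Dict.nodup_keys_insert _ _ _ hd)
        (by
          intro c hc
          rw [PySem.Dict.contains_insert]
          have hne : (c == x) = false := by
            simp only [beq_eq_false_iff_ne, ne_eq]
            exact (hmem c (by rw [PySem.Set.mem_ofList]; exact hc)).1
          rw [hne, hfresh c (by rw [hr] at hc; exact List.mem_cons_of_mem _ (List.mem_of_mem_filter hc))]
          rfl),
      hins, hset]
    rw [List.filter_cons_of_pos (by rw [← hcnt]; simpa using hlt)]
    simp only [List.map_cons, ← hcnt, htail]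
    simp
  | case3 d x xs r cnt hlt ih =>
    intro hd hfresh
    have hr : r = xs.filter (fun c => c != x) := List.filter_cons_of_neg (by simp)
    have hcnt : cnt = ((x :: xs).count x : Int) := by
      show ((x :: xs).length : Int) - (r.length : Int) = _
      rw [hr, List.count_cons_self]
      have := count_add_length_filter x xs
      simp only [List.length_cons]
      omega
    have hset : PySem.Set.ofList (x :: xs) = x :: PySem.Set.ofList r := by
      rw [PySem.Set.ofList_cons, hr, ofList_filter]
      rfl
    have hmem : ∀ c ∈ PySem.Set.ofList r, c ≠ x ∧ (r.count c : Int) = ((x :: xs).count c : Int) := by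
      intro c hc
      rw [PySem.Set.mem_ofList, hr, List.mem_filter] at hc
      have hne : c ≠ x := by simpa using hc.2
      exact ⟨hne, by rw [hr]; exact count_int_filter_ne x c xs hne⟩
    have htail : ((PySem.Set.ofList r).filter
            (fun c => decide (1 < ((x :: xs).count c : Int)))).map
            (fun c => (c, ((x :: xs).count c : Int)))
        = ((PySem.Set.ofList r).filter
            (fun c => decide (1 < (r.count c : Int)))).map
            (fun c => (c, (r.count c : Int))) := by
      rw [List.filter_congr (fun c hc => by rw [← (hmem c hc).2])]
      exact List.map_congr_left (fun c hc =>
        by rw [← (hmem c (List.mem_of_mem_filter hc)).2])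
    have hstep : pvAllitLoop (x :: xs) d = pvAllitLoop r d := by
      rw [pvAllitLoop]
      exact if_neg hlt
    rw [hstep, ih hd
        (fun c hc => hfresh c (by rw [hr] at hc; exact List.mem_cons_of_mem _ (List.mem_of_mem_filter hc))),
      hset]
    rw [List.filter_cons_of_neg (by rw [← hcnt]; simpa using hlt)]
    rw [htail]

theorem count_alliteration_eq (text : String) :
    count_alliteration text = count_alliteration_alt text := by
  show (((PySem.Str.split₀ text).foldl (fun d w =>
          if d.contains (keyFn w) then d.insert (keyFn w) (d.getD (keyFn w) 0 + 1)
          else d.insert (keyFn w) 1) PySem.Dict.empty).items.foldl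
        (fun d p => if 1 < p.2 then d.insert p.1 p.2 else d) PySem.Dict.empty).items
      = (pvAllitLoop ((PySem.Str.split₀ text).map keyFn) PySem.Dict.empty).items
  have hloop : (PySem.Str.split₀ text).foldl (fun d w =>
        if d.contains (keyFn w) then d.insert (keyFn w) (d.getD (keyFn w) 0 + 1)
        else d.insert (keyFn w) 1) PySem.Dict.empty
      = PySem.Dict.counter ((PySem.Str.split₀ text).map keyFn) := by
    rw [← PySem.Dict.foldl_insert_getD_add_one_eq_counter]
    simp only [List.foldl_map]
    have hfun : (fun (d : PySem.Dict String Int) (w : String) =>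
        if d.contains (keyFn w) then d.insert (keyFn w) (d.getD (keyFn w) 0 + 1)
        else d.insert (keyFn w) 1)
        = fun d w => d.insert (keyFn w) (d.getD (keyFn w) 0 + 1) := by
      funext d w
      by_cases h : d.contains (keyFn w) = true
      · rw [if_pos h]
      · have h' : d.contains (keyFn w) = false := by simpa using h
        have h0 : d.getD (keyFn w) 0 = 0 := PySem.Dict.getD_of_not_contains (d := d) (k := keyFn w) 0 h'
        rw [if_neg h, h0]
        norm_num
    rw [hfun]
  rw [hloop, PySem.Dict.items_counter,
    foldl_insert_if_items ((PySem.Set.ofList ((PySem.Str.split₀ text).map keyFn)).map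
        (fun c => (c, (((PySem.Str.split₀ text).map keyFn).count c : Int)))) Prod.fst Prod.snd
        (fun q => 1 < q.2) PySem.Dict.empty (by simp)
        (fun y _ => PySem.Dict.contains_empty _)
        (by
          rw [List.map_map]
          have hid : (Prod.fst ∘ fun c : String =>
              (c, (((PySem.Str.split₀ text).map keyFn).count c : Int))) = id := rfl
          rw [hid, List.map_id]
          exact PySem.Set.nodup_ofList ((PySem.Str.split₀ text).map keyFn)),
    pvAllitLoop_items ((PySem.Str.split₀ text).map keyFn) PySem.Dict.empty (by simp)
        (fun c _ => PySem.Dict.contains_empty _)]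
  simp [List.filter_map, Function.comp_def]

-- ===== VERDICT (by name: the statement is the Claim_ definition above) =====
theorem count_alliteration_spec : Claim_equal_count_alliteration := by
  intro text _
  exact count_alliteration_eq text
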